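-- pv_equiv track=rewrite | github.com/chriskesler35/model_mesh | backend/app/routes/pipelines.py | _check_approval_threshold
-- ===== SOURCE A (Python) =====
-- def _check_approval_threshold(approvals: list, approvers: list, policy: str) -> str:
--     """Check if approval threshold is met based on policy.
--
--     Returns: 'approved', 'rejected', or 'pending'.
--     Any single rejection immediately rejects regardless of policy.
--     """
--     if not approvals:
--         return "pending"
--
--     approve_count = sum(1 for a in approvals if a.get("action") == "approve")
--     reject_count = sum(1 for a in approvals if a.get("action") == "reject")
--
--     # Any rejection immediately rejects
--     if reject_count > 0:
--         return "rejected"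
--
--     total_approvers = max(len(approvers), 1)
--
--     if policy == "any":
--         return "approved" if approve_count >= 1 else "pending"
--     elif policy == "majority":
--         needed = (total_approvers // 2) + 1
--         return "approved" if approve_count >= needed else "pending"
--     elif policy == "all":
--         return "approved" if approve_count >= total_approvers else "pending"
--
--     # Default to 'any'
--     return "approved" if approve_count >= 1 else "pending"
-- ===== SOURCE B (Python) =====
-- def _check_approval_threshold(approvals: list, approvers: list, policy: str) -> str:
--     if not approvals:
--         return "pending"
--     total_approvers = max(len(approvers), 1)
--     needed = (total_approvers // 2 + 1 if policy == "majority"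
--               else total_approvers if policy == "all"
--               else 1)
--     return _verdict(approvals, needed)
--
--
-- def _verdict(approvals: list, remaining: int) -> str:
--     """Recursive judge: decrement the still-needed approvals toward zero."""
--     if not approvals:
--         return "approved" if remaining <= 0 else "pending"
--     action = approvals[0].get("action")
--     if action == "reject":
--         return "rejected"
--     return _verdict(approvals[1:], remaining - (1 if action == "approve" else 0))
-- ===== Notes on version B (the rewrite author's own statement) =====
-- stated objective: alternative
-- what changed: B computes the policy threshold up front and then judges the vote list by structural recursion that decrements the still-needed count toward zero (returning 'rejected' at the first reject), instead of A's two full counting passes followed by an if-elif chain of comparisons.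
import Mathlib
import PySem

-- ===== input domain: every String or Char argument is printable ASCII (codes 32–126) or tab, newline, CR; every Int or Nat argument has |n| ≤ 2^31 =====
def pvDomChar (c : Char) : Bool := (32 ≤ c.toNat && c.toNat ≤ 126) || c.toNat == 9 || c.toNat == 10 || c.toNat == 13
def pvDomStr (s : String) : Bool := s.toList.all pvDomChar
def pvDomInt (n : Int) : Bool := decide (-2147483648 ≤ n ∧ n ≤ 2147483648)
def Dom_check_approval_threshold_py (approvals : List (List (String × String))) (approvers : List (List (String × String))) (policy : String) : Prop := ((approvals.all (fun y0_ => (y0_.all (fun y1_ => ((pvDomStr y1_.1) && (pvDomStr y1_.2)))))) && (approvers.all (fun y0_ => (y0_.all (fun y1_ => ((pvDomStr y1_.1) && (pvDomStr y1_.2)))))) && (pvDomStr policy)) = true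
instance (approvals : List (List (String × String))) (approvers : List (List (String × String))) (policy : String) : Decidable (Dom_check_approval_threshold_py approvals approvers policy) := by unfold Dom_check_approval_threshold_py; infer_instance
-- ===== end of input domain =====

-- B computes the policy threshold first and judges the votes by a recursive
-- decrement-toward-zero pass, instead of A's two counting passes + if-elif chain
-- (objective: alternative).

-- shared helper: Python dict.get(k) on an association list (first match)
def pvGet (a : List (String × String)) (k : String) : Option String :=
  (a.find? (fun p => p.1 == k)).map (·.2)

-- ===== PORT A =====
def check_approval_threshold_py (approvals : List (List (String × String))) (approvers : List (List (String × String))) (policy : String) : String :=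
  if approvals = [] then "pending"
  else
    let approve_count : Int :=
      approvals.foldl (fun s a => if pvGet a "action" = some "approve" then s + 1 else s) 0
    let reject_count : Int :=
      approvals.foldl (fun s a => if pvGet a "action" = some "reject" then s + 1 else s) 0
    if reject_count > 0 then "rejected"
    else
      let total_approvers : Int := max (approvers.length : Int) 1
      if policy = "any" then (if approve_count ≥ 1 then "approved" else "pending")
      else if policy = "majority" then
        (if approve_count ≥ PySem.Int.floordiv total_approvers 2 + 1 then "approved" else "pending")
      else if policy = "all" then
        (if approve_count ≥ total_approvers then "approved" else "pending")
      else (if approve_count ≥ 1 then "approved" else "pending")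

-- ===== PORT B =====
-- B's recursive judge: returns "rejected" at the first reject, otherwise
-- decrements the still-needed count and decides at the end of the list.
def pvVerdict (approvals : List (List (String × String))) (remaining : Int) : String :=
  match approvals with
  | [] => if remaining ≤ 0 then "approved" else "pending"
  | a :: rest =>
    let action := pvGet a "action"
    if action = some "reject" then "rejected"
    else pvVerdict rest (remaining - (if action = some "approve" then 1 else 0))

def check_approval_threshold_py_alt (approvals : List (List (String × String))) (approvers : List (List (String × String))) (policy : String) : String :=
  if approvals = [] then "pending"
  else
    let total_approvers : Int := max (approvers.length : Int) 1
    let needed : Int :=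
      if policy = "majority" then PySem.Int.floordiv total_approvers 2 + 1
      else if policy = "all" then total_approvers
      else 1
    pvVerdict approvals needed

-- ===== PRECONDITION & SPEC =====
def Spec_check_approval_threshold_py (approvals : List (List (String × String))) (approvers : List (List (String × String))) (policy : String) (out : String) : Prop := out = check_approval_threshold_py_alt approvals approvers policy
instance (approvals : List (List (String × String))) (approvers : List (List (String × String))) (policy : String) (out : String) : Decidable (Spec_check_approval_threshold_py approvals approvers policy out) := by unfold Spec_check_approval_threshold_py; infer_instance

-- ===== CLAIM (what is proved, stated in full; the proofs are below) =====
def Claim_equal_check_approval_threshold_py : Prop := ∀ (approvals : List (List (String × String))) (approvers : List (List (String × String))) (policy : String), Dom_check_approval_threshold_py approvals approvers policy → Spec_check_approval_threshold_py approvals approvers policy (check_approval_threshold_py approvals approvers policy)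

-- ===== LEMMAS AND PROOFS =====

lemma foldl_count (p : List (String × String) → Prop) [DecidablePred p] :
    ∀ (xs : List (List (String × String))) (s : Int),
      xs.foldl (fun s a => if p a then s + 1 else s) s
        = s + (xs.countP (fun a => decide (p a)) : Int) := by
  intro xs
  induction xs with
  | nil => intro s; simp
  | cons a rest ih =>
    intro s
    by_cases h : p a <;> simp [h, ih] <;> ring

lemma pvVerdict_eq : ∀ (xs : List (List (String × String))) (r : Int),
    pvVerdict xs r =
      if ∀ a ∈ xs, ¬ (pvGet a "action" = some "reject")
      then (if r ≤ (xs.countP (fun a => decide (pvGet a "action" = some "approve")) : Int)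
            then "approved" else "pending")
      else "rejected" := by
  intro xs
  induction xs with
  | nil => intro r; simp [pvVerdict]
  | cons a rest ih =>
    intro r
    by_cases hr : pvGet a "action" = some "reject"
    · simp [pvVerdict, hr]
    · by_cases ha : pvGet a "action" = some "approve" <;>
      · simp only [pvVerdict, hr, ha, ih, List.countP_cons, List.mem_cons]
        by_cases hrest : ∀ b ∈ rest, ¬ (pvGet b "action" = some "reject") <;>
          simp [hr, ha, hrest]

theorem check_approval_threshold_py_spec_aux (approvals approvers : List (List (String × String))) (policy : String) :
    check_approval_threshold_py approvals approvers policy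
      = check_approval_threshold_py_alt approvals approvers policy := by
  unfold check_approval_threshold_py check_approval_threshold_py_alt
  by_cases hne : approvals = []
  · simp [hne]
  · rw [if_neg hne, if_neg hne, pvVerdict_eq,
        foldl_count (fun a => pvGet a "action" = some "approve"),
        foldl_count (fun a => pvGet a "action" = some "reject")]
    by_cases hrej : ∀ a ∈ approvals, ¬ (pvGet a "action" = some "reject")
    · have hzero : approvals.countP (fun a => decide (pvGet a "action" = some "reject")) = 0 := by
        rw [List.countP_eq_zero]
        intro a ha
        simpa using hrej a ha
      rw [if_pos hrej, hzero]
      simp only [Nat.cast_zero, zero_add]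
      rw [if_neg (by omega : ¬ ((0:Int) > 0))]
      by_cases h1 : policy = "majority"
      · simp [h1]
      · by_cases h2 : policy = "all"
        · simp [h2]
        · by_cases h3 : policy = "any" <;> simp [h1, h2, h3]
    · have hpos : 0 < approvals.countP (fun a => decide (pvGet a "action" = some "reject")) := by
        rw [List.countP_pos_iff]
        push Not at hrej
        obtain ⟨a, ha, h⟩ := hrej
        exact ⟨a, ha, by simpa using h⟩
      have hgt : (0:Int) < 0 + (approvals.countP (fun a => decide (pvGet a "action" = some "reject")) : Int) := by
        omega
      rw [if_neg hrej, if_pos hgt]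

-- ===== VERDICT (by name: the statement is the Claim_ definition above) =====
theorem check_approval_threshold_py_spec : Claim_equal_check_approval_threshold_py := by
  intro approvals approvers policy _
  unfold Spec_check_approval_threshold_py
  exact check_approval_threshold_py_spec_aux approvals approvers policy
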